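-- pv_equiv track=rewrite | github.com/everything-is-simple/lifespan-0.01 | src/mlq/malf/wave_life_shared.py | _normalize_timeframes
-- ===== SOURCE A (Python) =====
-- from typing import Final
--
-- DEFAULT_TIMEFRAMES: Final[tuple[str, ...]] = ("D", "W", "M")
--
-- SUPPORTED_TIMEFRAMES: Final[tuple[str, ...]] = ("D", "W", "M")
--
-- def _normalize_timeframes(timeframes: list[str] | tuple[str, ...] | None) -> tuple[str, ...]:
--     if not timeframes:
--         return DEFAULT_TIMEFRAMES
--     normalized = tuple(dict.fromkeys(str(value).strip().upper() for value in timeframes if str(value).strip()))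
--     invalid = [value for value in normalized if value not in SUPPORTED_TIMEFRAMES]
--     if invalid:
--         raise ValueError(f"Unsupported timeframes: {invalid}")
--     return normalized
-- ===== SOURCE B (Python) =====
-- DEFAULT_TIMEFRAMES = ("D", "W", "M")
-- SUPPORTED_TIMEFRAMES = ("D", "W", "M")
--
--
-- def _normalize_timeframes(timeframes):
--     if not timeframes:
--         return DEFAULT_TIMEFRAMES
--     # Keep-first dedup as a right fold: walk the input right-to-left, prepend the
--     # normalized value and drop its later duplicates from the tail built so far.
--     normalized = []
--     for value in reversed(timeframes):
--         s = str(value).strip()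
--         if s:
--             u = s.upper()
--             normalized = [u] + [x for x in normalized if x != u]
--     invalid = [v for v in normalized if v not in SUPPORTED_TIMEFRAMES]
--     if invalid:
--         raise ValueError(f"Unsupported timeframes: {invalid}")
--     return tuple(normalized)
-- ===== Notes on version B (the rewrite author's own statement) =====
-- stated objective: alternative
-- what changed: Replaced the hash-based first-occurrence dedup (dict.fromkeys over a generator) with a right-to-left traversal that rebuilds the result by prepending each normalized value and filtering its later duplicates out of the tail built so far - no dict or set at all (dedup as a right fold).
import Mathlib
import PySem

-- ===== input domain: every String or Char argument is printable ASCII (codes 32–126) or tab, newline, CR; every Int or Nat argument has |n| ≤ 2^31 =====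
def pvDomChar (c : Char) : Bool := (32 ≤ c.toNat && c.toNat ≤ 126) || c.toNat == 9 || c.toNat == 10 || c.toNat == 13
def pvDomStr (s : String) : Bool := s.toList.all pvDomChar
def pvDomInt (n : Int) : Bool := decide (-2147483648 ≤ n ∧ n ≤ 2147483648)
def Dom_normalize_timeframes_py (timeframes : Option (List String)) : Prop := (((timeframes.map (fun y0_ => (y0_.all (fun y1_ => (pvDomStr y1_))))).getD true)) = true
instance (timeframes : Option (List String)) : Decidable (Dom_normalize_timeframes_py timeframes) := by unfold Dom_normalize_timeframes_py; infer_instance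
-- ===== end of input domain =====

-- B replaces A's dict.fromkeys dedup with a right-to-left traversal that prepends each normalized
-- value and filters its later duplicates from the tail built so far (no dict/set); same return value
-- on inputs where A returns normally (no ValueError).

def pvSupported : List String := ["D", "W", "M"]

-- ===== PORT A =====
-- normalized = tuple(dict.fromkeys(str(v).strip().upper() for v in timeframes if str(v).strip()))
-- invalid = [v for v in normalized if v not in SUPPORTED_TIMEFRAMES]; raise if invalid (excluded by Pre_)
def normalize_timeframes_py (timeframes : Option (List String)) : List String :=
  match timeframes with
  | none => ["D", "W", "M"]
  | some tfs =>
    if tfs = [] then ["D", "W", "M"]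
    else
      let normalized : List String :=
        PySem.List.dedup ((tfs.filter (fun v => PySem.Str.strip v ≠ "")).map
          (fun v => PySem.Str.upper (PySem.Str.strip v)))
      let invalid := normalized.filter (fun v => v ∉ pvSupported)
      if invalid ≠ [] then []  -- Python raises ValueError here; unreachable under Pre_
      else normalized

-- ===== PORT B =====
-- loop body: normalized = [u] + [x for x in normalized if x != u]
def pvStep (acc : List String) (v : String) : List String :=
  let s := PySem.Str.strip v
  if s = "" then acc
  else
    let u := PySem.Str.upper s
    u :: acc.filter (fun x => x ≠ u)

def normalize_timeframes_py_alt (timeframes : Option (List String)) : List String :=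
  match timeframes with
  | none => ["D", "W", "M"]
  | some tfs =>
    if tfs = [] then ["D", "W", "M"]
    else
      let normalized := tfs.reverse.foldl pvStep []
      let invalid := normalized.filter (fun v => v ∉ pvSupported)
      if invalid ≠ [] then []  -- Python raises ValueError here; unreachable under Pre_
      else normalized

-- ===== PRECONDITION & SPEC =====
-- Pre_ excludes exactly the inputs on which A raises ValueError: a list containing a value whose
-- stripped-uppercased form is nonempty and not among the supported timeframes "D"/"W"/"M".
def Pre_normalize_timeframes_py (timeframes : Option (List String)) : Prop :=
  ∀ v ∈ timeframes.getD [], PySem.Str.strip v ≠ "" → PySem.Str.upper (PySem.Str.strip v) ∈ pvSupported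
instance (timeframes : Option (List String)) : Decidable (Pre_normalize_timeframes_py timeframes) := by
  unfold Pre_normalize_timeframes_py; infer_instance

def pvWitness_normalize_timeframes_py : Option (List String) := some [" d ", "D", "w"]

def Spec_normalize_timeframes_py (timeframes : Option (List String)) (out : List String) : Prop := out = normalize_timeframes_py_alt timeframes
instance (timeframes : Option (List String)) (out : List String) : Decidable (Spec_normalize_timeframes_py timeframes out) := by unfold Spec_normalize_timeframes_py; infer_instance

-- ===== CLAIM (what is proved, stated in full; the proofs are below) =====
def Claim_equal_normalize_timeframes_py : Prop := ∀ (timeframes : Option (List String)), Dom_normalize_timeframes_py timeframes → Pre_normalize_timeframes_py timeframes → Spec_normalize_timeframes_py timeframes (normalize_timeframes_py timeframes)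

-- ===== LEMMAS AND PROOFS =====

-- the pure right-fold dedup B computes on the already-normalized values
def pvKF : List String → List String
  | [] => []
  | u :: r => u :: (pvKF r).filter (fun x => x ≠ u)

theorem pvFoldAdd (l : List String) : ∀ acc : List String,
    l.foldl PySem.Set.add acc = acc ++ (pvKF l).filter (fun x => !decide (x ∈ acc)) := by
  induction l with
  | nil => intro acc; simp [pvKF]
  | cons u r ih =>
    intro acc
    by_cases hu : u ∈ acc
    · have hadd : PySem.Set.add acc u = acc := by simp [PySem.Set.add, PySem.Set.contains, hu]
      rw [List.foldl_cons, hadd, ih acc]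
      have hfe : (fun x => !decide (x ∈ acc)) = (fun x => !decide (x = u) && !decide (x ∈ acc)) := by
        funext x
        by_cases hx : x = u
        · subst hx; simp [hu]
        · simp [hx]
      simp only [pvKF, List.filter_cons, decide_not, hu, decide_true, Bool.not_true,
        Bool.false_eq_true, if_false, List.filter_filter]
      rw [hfe]
      simp [Bool.and_comm]
    · have hadd : PySem.Set.add acc u = acc ++ [u] := by
        simp [PySem.Set.add, PySem.Set.contains, hu]
      rw [List.foldl_cons, hadd, ih (acc ++ [u])]
      have hfe : (fun x => !decide (x ∈ acc ++ [u])) = (fun x => !decide (x = u) && !decide (x ∈ acc)) := by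
        funext x
        by_cases hx : x = u
        · subst hx; simp
        · simp [hx]
      simp only [pvKF, List.filter_cons, decide_not, hu, decide_false, Bool.not_false,
        if_true, List.filter_filter]
      rw [hfe, List.append_assoc, List.singleton_append]
      simp [Bool.and_comm]

theorem pvKF_eq_dedup (l : List String) : pvKF l = PySem.List.dedup l := by
  rw [PySem.List.dedup_eq_ofList, PySem.Set.ofList_eq_foldl, pvFoldAdd l []]
  simp

theorem pvLoop_eq_kf (tfs : List String) :
    tfs.reverse.foldl pvStep [] =
      pvKF ((tfs.filter (fun v => PySem.Str.strip v ≠ "")).map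
        (fun v => PySem.Str.upper (PySem.Str.strip v))) := by
  rw [List.foldl_reverse]
  induction tfs with
  | nil => simp [pvKF]
  | cons v rest ih =>
    rw [List.foldr_cons, ih]
    by_cases hs : PySem.Str.strip v = ""
    · rw [List.filter_cons_of_neg (by simpa using hs)]
      simp [pvStep, hs]
    · rw [List.filter_cons_of_pos (by simpa using hs), List.map_cons]
      simp [pvStep, hs, pvKF]

-- ===== VERDICT (by name: the statement is the Claim_ definition above) =====
theorem normalize_timeframes_py_spec : Claim_equal_normalize_timeframes_py := by
  intro timeframes _ _
  unfold Spec_normalize_timeframes_py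
  match timeframes with
  | none => rfl
  | some tfs =>
    by_cases he : tfs = []
    · simp [normalize_timeframes_py, normalize_timeframes_py_alt, he]
    · have key : tfs.reverse.foldl pvStep [] =
          PySem.List.dedup ((tfs.filter (fun v => PySem.Str.strip v ≠ "")).map
            (fun v => PySem.Str.upper (PySem.Str.strip v))) := by
        rw [pvLoop_eq_kf, pvKF_eq_dedup]
      simp only [normalize_timeframes_py, normalize_timeframes_py_alt, if_neg he, key]
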